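-- pv_equiv track=rewrite | github.com/submaxamus-create/ultramode-backup | chat_packets/2026-04-09_key_bundle/iron_gardener_ui_v0_3_r1_color_list.py | pick_top_stage
-- ===== SOURCE A (Python) =====
-- def pick_top_stage(stages):
--     if not stages:
--         return "REVIEW"
--     priority = ["TROUBLE", "LOST_INTELLIGENCE", "DUPLICATE", "ARCHIVE", "REVIEW", "KEEP"]
--     for p in priority:
--         if p in stages:
--             return p
--     return next(iter(stages.keys()))
-- ===== SOURCE B (Python) =====
-- def pick_top_stage(stages):
--     if not stages:
--         return "REVIEW"
--     priority = ["TROUBLE", "LOST_INTELLIGENCE", "DUPLICATE", "ARCHIVE", "REVIEW", "KEEP"]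
--     rank = {p: i for i, p in enumerate(priority)}
--     return min(stages, key=lambda k: rank.get(k, len(priority)))
-- ===== Notes on version B (the rewrite author's own statement) =====
-- stated objective: idiomatic
-- what changed: Instead of scanning the priority list and testing membership in the dict for each entry, B precomputes a rank index over the priorities and takes min over the dict's keys by rank (first minimal key, with rank len(priority) for non-priority keys), relying on min returning the first minimal element to reproduce the first-key fallback.
import Mathlib
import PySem

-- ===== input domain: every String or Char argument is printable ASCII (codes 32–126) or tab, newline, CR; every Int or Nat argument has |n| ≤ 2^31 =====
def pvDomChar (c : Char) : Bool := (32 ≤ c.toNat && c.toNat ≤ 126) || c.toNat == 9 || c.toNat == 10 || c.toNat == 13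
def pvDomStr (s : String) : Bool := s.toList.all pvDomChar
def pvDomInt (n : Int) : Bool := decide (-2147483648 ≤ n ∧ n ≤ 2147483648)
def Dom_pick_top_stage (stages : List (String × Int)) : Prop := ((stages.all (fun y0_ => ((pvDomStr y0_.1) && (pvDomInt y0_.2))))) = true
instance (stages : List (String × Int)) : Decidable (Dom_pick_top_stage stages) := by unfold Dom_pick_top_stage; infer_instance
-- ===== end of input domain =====

-- B replaces A's scan of the priority list (membership test per priority) by a precomputed
-- rank index and a single min-by-rank pass over the dict's keys (idiomatic; same result).


-- ===== PORT A =====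
-- the priority list literal from A (also used, via enumerate, by B's rank dict)
def pvPriority : List String :=
  ["TROUBLE", "LOST_INTELLIGENCE", "DUPLICATE", "ARCHIVE", "REVIEW", "KEEP"]

-- 'for p in priority: if p in stages: return p' = first priority that is a key; else first key.
def pick_top_stage (stages : List (String × Int)) : String :=
  if stages.isEmpty then "REVIEW"
  else
    let keys := stages.map Prod.fst
    match pvPriority.find? (fun p => keys.contains p) with
    | some p => p
    | none => keys.headD "REVIEW"   -- next(iter(stages.keys())); keys is nonempty here

-- ===== PORT B =====
-- rank = {p: i for i, p in enumerate(priority)}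
def pvRank : PySem.Dict String Int :=
  PySem.Dict.ofList ((PySem.List.enumerate pvPriority).map (fun ip => (ip.2, ip.1)))

-- lambda k: rank.get(k, len(priority))
def pvRk (k : String) : Int := pvRank.getD k (pvPriority.length : Int)

def pick_top_stage_alt (stages : List (String × Int)) : String :=
  if stages.isEmpty then "REVIEW"
  else
    match PySem.List.min? (stages.map Prod.fst) pvRk with
    | some k => k
    | none => "REVIEW"   -- unreachable: stages is nonempty

-- ===== PRECONDITION & SPEC =====
def Spec_pick_top_stage (stages : List (String × Int)) (out : String) : Prop := out = pick_top_stage_alt stages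
instance (stages : List (String × Int)) (out : String) : Decidable (Spec_pick_top_stage stages out) := by unfold Spec_pick_top_stage; infer_instance

-- ===== CLAIM (what is proved, stated in full; the proofs are below) =====
def Claim_equal_pick_top_stage : Prop := ∀ (stages : List (String × Int)), Dom_pick_top_stage stages → Spec_pick_top_stage stages (pick_top_stage stages)

-- ===== LEMMAS AND PROOFS =====

-- pvRk as explicit nested ifs
theorem pvRk_cases (k : String) :
    pvRk k = if k = "TROUBLE" then 0 else if k = "LOST_INTELLIGENCE" then 1 else
             if k = "DUPLICATE" then 2 else if k = "ARCHIVE" then 3 else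
             if k = "REVIEW" then 4 else if k = "KEEP" then 5 else 6 := by
  simp [pvRk, pvRank, pvPriority, PySem.List.enumerate, PySem.Dict.ofList, PySem.Dict.getD,
        PySem.Dict.update, PySem.Dict.get?_insert]
  split_ifs <;> simp_all

-- min? returns p when p is present, has minimal key, and is the unique element with that key
theorem min?_eq_of_unique {ks : List String} {f : String → Int} {p : String}
    (hp : p ∈ ks) (hmin : ∀ k ∈ ks, f p ≤ f k) (huniq : ∀ k ∈ ks, f k = f p → k = p) :
    PySem.List.min? ks f = some p := by
  rcases hm : PySem.List.min? ks f with _ | m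
  · exact absurd ((PySem.List.min?_eq_none_iff ks f).mp hm ▸ hp) (List.not_mem_nil)
  · have hmem := PySem.List.min?_mem hm
    have h1 := PySem.List.min?_isMin hm p hp
    have h2 := hmin m hmem
    have := huniq m hmem (le_antisymm h1 h2)
    simp [this]

-- min? with a constant key returns the first element
theorem min?_const_head {x : String} {t : List String} {f : String → Int}
    (h : ∀ k ∈ x :: t, f k = f x) : PySem.List.min? (x :: t) f = some x := by
  induction t with
  | nil => rfl
  | cons y ys ih =>
    have hy : f y = f x := h y (by simp)
    have hstep : PySem.List.min? (x :: y :: ys) f = PySem.List.min? (x :: ys) f := by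
      simp [PySem.List.min?, hy]
    rw [hstep]
    exact ih (fun k hk => by
      rcases List.mem_cons.mp hk with rfl | hk'
      · exact h k (by simp)
      · exact h k (by simp [hk']))

-- rank values are nonnegative
theorem rk_nonneg (q : String) : 0 ≤ pvRk q := by
  rw [pvRk_cases]; split_ifs <;> omega

-- the value i < 6 identifies the priority string
theorem rk_eq_zero (q : String) (h : pvRk q = 0) : q = "TROUBLE" := by
  rw [pvRk_cases] at h; split_ifs at h <;> first | assumption | omega
theorem rk_eq_one (q : String) (h : pvRk q = 1) : q = "LOST_INTELLIGENCE" := by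
  rw [pvRk_cases] at h; split_ifs at h <;> first | assumption | omega
theorem rk_eq_two (q : String) (h : pvRk q = 2) : q = "DUPLICATE" := by
  rw [pvRk_cases] at h; split_ifs at h <;> first | assumption | omega
theorem rk_eq_three (q : String) (h : pvRk q = 3) : q = "ARCHIVE" := by
  rw [pvRk_cases] at h; split_ifs at h <;> first | assumption | omega
theorem rk_eq_four (q : String) (h : pvRk q = 4) : q = "REVIEW" := by
  rw [pvRk_cases] at h; split_ifs at h <;> first | assumption | omega
theorem rk_eq_five (q : String) (h : pvRk q = 5) : q = "KEEP" := by
  rw [pvRk_cases] at h; split_ifs at h <;> first | assumption | omega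

-- strings of rank below i are among the first i priorities
theorem rk_lt_one (q : String) (h : pvRk q < 1) : q = "TROUBLE" := by
  rw [pvRk_cases] at h; split_ifs at h <;> first | assumption | omega
theorem rk_lt_two (q : String) (h : pvRk q < 2) : q = "TROUBLE" ∨ q = "LOST_INTELLIGENCE" := by
  rw [pvRk_cases] at h; split_ifs at h <;> simp_all
theorem rk_lt_three (q : String) (h : pvRk q < 3) :
    q = "TROUBLE" ∨ q = "LOST_INTELLIGENCE" ∨ q = "DUPLICATE" := by
  rw [pvRk_cases] at h; split_ifs at h <;> simp_all
theorem rk_lt_four (q : String) (h : pvRk q < 4) :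
    q = "TROUBLE" ∨ q = "LOST_INTELLIGENCE" ∨ q = "DUPLICATE" ∨ q = "ARCHIVE" := by
  rw [pvRk_cases] at h; split_ifs at h <;> simp_all
theorem rk_lt_five (q : String) (h : pvRk q < 5) :
    q = "TROUBLE" ∨ q = "LOST_INTELLIGENCE" ∨ q = "DUPLICATE" ∨ q = "ARCHIVE" ∨ q = "REVIEW" := by
  rw [pvRk_cases] at h; split_ifs at h <;> simp_all

-- a non-priority string ranks 6
theorem rk_six (q : String) (h1 : q ≠ "TROUBLE") (h2 : q ≠ "LOST_INTELLIGENCE")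
    (h3 : q ≠ "DUPLICATE") (h4 : q ≠ "ARCHIVE") (h5 : q ≠ "REVIEW") (h6 : q ≠ "KEEP") :
    pvRk q = 6 := by
  rw [pvRk_cases]; split_ifs <;> simp_all

-- literal rank values
theorem rk_vals : pvRk "TROUBLE" = 0 ∧ pvRk "LOST_INTELLIGENCE" = 1 ∧ pvRk "DUPLICATE" = 2 ∧
    pvRk "ARCHIVE" = 3 ∧ pvRk "REVIEW" = 4 ∧ pvRk "KEEP" = 5 := by decide

-- min?-by-rank picks the priority p when p ∈ ks and nothing of lower rank is in ks
theorem min?_rk_present (ks : List String) (p : String) (hp : p ∈ ks)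
    (hlow : ∀ q ∈ ks, ¬ pvRk q < pvRk p) (hu : ∀ q, pvRk q = pvRk p → q = p) :
    PySem.List.min? ks pvRk = some p :=
  min?_eq_of_unique hp (fun k hk => not_lt.mp (hlow k hk)) (fun k _ hk => hu k hk)

-- the two branch computations agree on any nonempty key list
theorem pv_core (k0 : String) (rest : List String) :
    (match pvPriority.find? (fun p => (k0 :: rest).contains p) with
     | some p => p
     | none => (k0 :: rest).headD "REVIEW") =
    (match PySem.List.min? (k0 :: rest) pvRk with
     | some k => k
     | none => "REVIEW") := by
  obtain ⟨r0, r1, r2, r3, r4, r5⟩ := rk_vals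
  by_cases h1 : "TROUBLE" ∈ k0 :: rest
  · rw [show pvPriority.find? (fun p => (k0 :: rest).contains p) = some "TROUBLE" by
      (simp [pvPriority, List.mem_cons] at *; tauto)]
    rw [min?_rk_present _ _ h1
      (fun q _ h => absurd h (by rw [r0]; exact not_lt.mpr (rk_nonneg q)))
      (fun q h => rk_eq_zero q (by omega))]
  · by_cases h2 : "LOST_INTELLIGENCE" ∈ k0 :: rest
    · rw [show pvPriority.find? (fun p => (k0 :: rest).contains p) = some "LOST_INTELLIGENCE" by
        (simp [pvPriority, List.mem_cons] at *; tauto)]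
      rw [min?_rk_present _ _ h2
        (fun q hq h => by rw [r1] at h; exact h1 (rk_lt_one q h ▸ hq))
        (fun q h => rk_eq_one q (by omega))]
    · by_cases h3 : "DUPLICATE" ∈ k0 :: rest
      · rw [show pvPriority.find? (fun p => (k0 :: rest).contains p) = some "DUPLICATE" by
          (simp [pvPriority, List.mem_cons] at *; tauto)]
        rw [min?_rk_present _ _ h3
          (fun q hq h => by
            rw [r2] at h
            rcases rk_lt_two q h with rfl | rfl
            exacts [h1 hq, h2 hq])
          (fun q h => rk_eq_two q (by omega))]
      · by_cases h4 : "ARCHIVE" ∈ k0 :: rest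
        · rw [show pvPriority.find? (fun p => (k0 :: rest).contains p) = some "ARCHIVE" by
            (simp [pvPriority, List.mem_cons] at *; tauto)]
          rw [min?_rk_present _ _ h4
            (fun q hq h => by
              rw [r3] at h
              rcases rk_lt_three q h with rfl | rfl | rfl
              exacts [h1 hq, h2 hq, h3 hq])
            (fun q h => rk_eq_three q (by omega))]
        · by_cases h5 : "REVIEW" ∈ k0 :: rest
          · rw [show pvPriority.find? (fun p => (k0 :: rest).contains p) = some "REVIEW" by
              (simp [pvPriority, List.mem_cons] at *; tauto)]
            rw [min?_rk_present _ _ h5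
              (fun q hq h => by
                rw [r4] at h
                rcases rk_lt_four q h with rfl | rfl | rfl | rfl
                exacts [h1 hq, h2 hq, h3 hq, h4 hq])
              (fun q h => rk_eq_four q (by omega))]
          · by_cases h6 : "KEEP" ∈ k0 :: rest
            · rw [show pvPriority.find? (fun p => (k0 :: rest).contains p) = some "KEEP" by
                (simp [pvPriority, List.mem_cons] at *; tauto)]
              rw [min?_rk_present _ _ h6
                (fun q hq h => by
                  rw [r5] at h
                  rcases rk_lt_five q h with rfl | rfl | rfl | rfl | rfl
                  exacts [h1 hq, h2 hq, h3 hq, h4 hq, h5 hq])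
                (fun q h => rk_eq_five q (by omega))]
            · rw [show pvPriority.find? (fun p => (k0 :: rest).contains p) = none by
                (simp [pvPriority, List.mem_cons] at *; tauto)]
              have hconst : ∀ k ∈ k0 :: rest, pvRk k = pvRk k0 := by
                have six : ∀ k ∈ k0 :: rest, pvRk k = 6 := by
                  intro k hk
                  apply rk_six
                  all_goals rintro rfl
                  exacts [h1 hk, h2 hk, h3 hk, h4 hk, h5 hk, h6 hk]
                intro k hk
                rw [six k hk, six k0 (by simp)]
              rw [min?_const_head hconst]
              rfl

-- ===== VERDICT (by name: the statement is the Claim_ definition above) =====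
theorem pick_top_stage_spec : Claim_equal_pick_top_stage := by
  intro stages _
  unfold Spec_pick_top_stage pick_top_stage pick_top_stage_alt
  cases stages with
  | nil => rfl
  | cons hd tl =>
    simp only [List.isEmpty_cons, Bool.false_eq_true, if_false, List.map_cons]
    exact pv_core hd.1 (tl.map Prod.fst)
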